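-- pv_equiv track=rewrite | github.com/Darwinky25/DARWIN-with-ALLA-engine | thinking_engine.py | are_conceptual_opposites
-- ===== SOURCE A (Python) =====
-- from typing import Dict, List, Set, Tuple, Optional, Any
--
-- def are_conceptual_opposites(attrs1: List[str], attrs2: List[str]) -> bool:
--     """Check if two concept attribute lists represent opposites"""
--     opposite_pairs = [
--         ('positive', 'negative'),
--         ('big', 'small'),
--         ('fast', 'slow'),
--         ('hot', 'cold'),
--         ('light', 'dark'),
--         ('up', 'down')
--     ]
--
--     for pair in opposite_pairs:
--         if (pair[0] in attrs1 and pair[1] in attrs2) or \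
--            (pair[1] in attrs1 and pair[0] in attrs2):
--             return True
--     return False
-- ===== SOURCE B (Python) =====
-- _OPPOSITE = {
--     'positive': 'negative', 'negative': 'positive',
--     'big': 'small', 'small': 'big',
--     'fast': 'slow', 'slow': 'fast',
--     'hot': 'cold', 'cold': 'hot',
--     'light': 'dark', 'dark': 'light',
--     'up': 'down', 'down': 'up',
-- }
--
-- def are_conceptual_opposites(attrs1, attrs2):
--     """Check if two concept attribute lists represent opposites"""
--     for a in attrs1:
--         partner = _OPPOSITE.get(a)
--         if partner is not None and partner in attrs2:
--             return True
--     return False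
-- ===== Notes on version B (the rewrite author's own statement) =====
-- stated objective: idiomatic
-- what changed: B iterates over the input list attrs1 and consults a precomputed bidirectional antonym dict, instead of A's scan over the fixed pair table with two membership tests per pair.
import Mathlib
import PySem

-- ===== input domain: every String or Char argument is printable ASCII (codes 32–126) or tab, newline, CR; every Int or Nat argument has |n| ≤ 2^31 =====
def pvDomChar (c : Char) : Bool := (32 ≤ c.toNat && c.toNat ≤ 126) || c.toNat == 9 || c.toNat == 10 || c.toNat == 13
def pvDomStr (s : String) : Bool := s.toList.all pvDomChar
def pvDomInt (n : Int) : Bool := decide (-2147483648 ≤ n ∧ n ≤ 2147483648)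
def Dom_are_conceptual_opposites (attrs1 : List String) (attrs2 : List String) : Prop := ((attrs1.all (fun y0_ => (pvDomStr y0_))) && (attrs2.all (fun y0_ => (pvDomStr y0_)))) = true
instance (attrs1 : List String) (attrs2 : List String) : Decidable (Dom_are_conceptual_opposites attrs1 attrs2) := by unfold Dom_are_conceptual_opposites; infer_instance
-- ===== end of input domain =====

-- B iterates over attrs1 consulting a precomputed bidirectional antonym dict, instead of A's scan over the fixed pair table; proved to return the same Bool on every input.


-- ===== PORT A =====
-- A's fixed table of opposite pairs
def oppositePairs : List (String × String) :=
  [("positive", "negative"), ("big", "small"), ("fast", "slow"),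
   ("hot", "cold"), ("light", "dark"), ("up", "down")]

-- A: scan the pair table; early return becomes List.any
def are_conceptual_opposites (attrs1 : List String) (attrs2 : List String) : Bool :=
  oppositePairs.any (fun pair =>
    (attrs1.contains pair.1 && attrs2.contains pair.2) ||
    (attrs1.contains pair.2 && attrs2.contains pair.1))

-- ===== PORT B =====
-- B's module-level bidirectional antonym dict
def oppositeDict : PySem.Dict String String :=
  PySem.Dict.ofList
    [("positive", "negative"), ("negative", "positive"),
     ("big", "small"), ("small", "big"),
     ("fast", "slow"), ("slow", "fast"),
     ("hot", "cold"), ("cold", "hot"),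
     ("light", "dark"), ("dark", "light"),
     ("up", "down"), ("down", "up")]

-- B: loop over attrs1; early return becomes List.any
def are_conceptual_opposites_alt (attrs1 : List String) (attrs2 : List String) : Bool :=
  attrs1.any (fun a =>
    match oppositeDict.get? a with
    | some partner => attrs2.contains partner
    | none => false)

-- ===== PRECONDITION & SPEC =====
def Spec_are_conceptual_opposites (attrs1 : List String) (attrs2 : List String) (out : Bool) : Prop := out = are_conceptual_opposites_alt attrs1 attrs2
instance (attrs1 : List String) (attrs2 : List String) (out : Bool) : Decidable (Spec_are_conceptual_opposites attrs1 attrs2 out) := by unfold Spec_are_conceptual_opposites; infer_instance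

-- ===== CLAIM (what is proved, stated in full; the proofs are below) =====
def Claim_equal_are_conceptual_opposites : Prop := ∀ (attrs1 : List String) (attrs2 : List String), Dom_are_conceptual_opposites attrs1 attrs2 → Spec_are_conceptual_opposites attrs1 attrs2 (are_conceptual_opposites attrs1 attrs2)

-- ===== LEMMAS AND PROOFS =====

-- the 12 directed (key, partner) entries of oppositeDict, as an association list
def dirPairs : List (String × String) :=
  [("positive", "negative"), ("negative", "positive"),
   ("big", "small"), ("small", "big"),
   ("fast", "slow"), ("slow", "fast"),
   ("hot", "cold"), ("cold", "hot"),
   ("light", "dark"), ("dark", "light"),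
   ("up", "down"), ("down", "up")]

theorem items_oppositeDict : oppositeDict.items = dirPairs := by decide

-- every entry is the FIRST entry with its own key (keys are distinct)
theorem find?_dirPairs_self :
    ∀ p ∈ dirPairs, List.find? (fun q => q.1 == p.1) dirPairs = some p := by decide

theorem get?_oppositeDict (a : String) :
    oppositeDict.get? a = Option.map (fun x => x.2) (List.find? (fun q => q.1 == a) dirPairs) := by
  simp only [PySem.Dict.get?, items_oppositeDict]

theorem body_true_iff (attrs2 : List String) (a : String) :
    (match oppositeDict.get? a with
     | some partner => attrs2.contains partner
     | none => false) = true ↔ ∃ p ∈ dirPairs, p.1 = a ∧ p.2 ∈ attrs2 := by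
  rw [get?_oppositeDict]
  constructor
  · intro h
    cases hf : List.find? (fun q => q.1 == a) dirPairs with
    | none => rw [hf] at h; simp at h
    | some p =>
      rw [hf] at h
      simp only [Option.map_some] at h
      refine ⟨p, List.mem_of_find?_eq_some hf, ?_, ?_⟩
      · have := List.find?_some hf
        simpa using this
      · simpa using h
  · rintro ⟨p, hp, rfl, hmem⟩
    rw [find?_dirPairs_self p hp]
    simpa using hmem

theorem alt_true_iff (attrs1 attrs2 : List String) :
    are_conceptual_opposites_alt attrs1 attrs2 = true ↔
      ∃ p ∈ dirPairs, p.1 ∈ attrs1 ∧ p.2 ∈ attrs2 := by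
  simp only [are_conceptual_opposites_alt, List.any_eq_true]
  constructor
  · rintro ⟨a, ha, hb⟩
    obtain ⟨p, hp, hpa, hp2⟩ := (body_true_iff attrs2 a).mp hb
    exact ⟨p, hp, hpa ▸ ha, hp2⟩
  · rintro ⟨p, hp, h1, h2⟩
    exact ⟨p.1, h1, (body_true_iff attrs2 p.1).mpr ⟨p, hp, rfl, h2⟩⟩

-- ===== VERDICT (by name: the statement is the Claim_ definition above) =====
theorem are_conceptual_opposites_spec : Claim_equal_are_conceptual_opposites := by
  intro attrs1 attrs2 _
  unfold Spec_are_conceptual_opposites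
  rw [Bool.eq_iff_iff, alt_true_iff]
  simp only [are_conceptual_opposites, oppositePairs, dirPairs, List.any_eq_true,
    List.mem_cons, List.not_mem_nil, Bool.or_eq_true, Bool.and_eq_true,
    List.contains_eq_mem, decide_eq_true_eq]
  constructor
  · rintro ⟨p, hp, h⟩
    rcases hp with rfl | rfl | rfl | rfl | rfl | rfl | h0
    all_goals rcases h with ⟨h1, h2⟩ | ⟨h1, h2⟩ <;> simp_all
  · rintro ⟨p, hp, h1, h2⟩
    rcases hp with rfl | rfl | rfl | rfl | rfl | rfl | rfl | rfl | rfl | rfl | rfl | rfl | h0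
    all_goals simp_all
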